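-- pv_equiv track=rewrite | github.com/aleena2121/Python | Logical Problems/cross_broken_bridge.py | can_patch
-- ===== SOURCE A (Python) =====
-- from collections import Counter
--
-- def can_patch(bridge,planks):
--     """
--     Function to tell if a person can cross the broken bridge with given planks or not
--
--     Args:
--     bridge: a list representating bridge
--     planks: a list of sizes of planks available
--
--     Returns:
--     True if bridge can be crossed, else false
--     """
--     plank_counts = Counter(planks)
--     no_of_holes = 0
--     i = 0
--     while i < len(bridge):
--         if bridge[i] == 0:
--             no_of_holes += 1
--         else:
--             if no_of_holes > 1:
--                 if plank_counts[no_of_holes] > 0: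
--                     plank_counts[no_of_holes] -= 1
--                 else:
--                     return False
--             no_of_holes = 0
--         i += 1
--
--     if no_of_holes > 1:  # if bridge ends with holes
--         if plank_counts[no_of_holes] > 0:
--             plank_counts[no_of_holes] -= 1
--         else:
--             return False
--
--     return True
-- ===== SOURCE B (Python) =====
-- from collections import Counter
--
--
-- def can_patch(bridge, planks):
--     # Solid-cell positions with sentinels; adjacent differences give the sizes
--     # of all (possibly empty) zero gaps between consecutive solid cells.
--     solid = [-1] + [i for i, x in enumerate(bridge) if x != 0] + [len(bridge)]
--     need = Counter(b - a - 1 for a, b in zip(solid, solid[1:]))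
--     have = Counter(planks)
--     # Each gap of size g > 1 needs exactly one plank of size g, so the greedy
--     # left-to-right matching succeeds iff, per size, supply covers demand.
--     return all(have[g] >= c for g, c in need.items() if g > 1)
-- ===== Notes on version B (the rewrite author's own statement) =====
-- stated objective: alternative
-- what changed: B computes gap sizes as adjacent differences of the sentinel-padded list of solid-cell positions and decides by a per-size multiset comparison (demand Counter vs supply Counter), instead of A's interleaved run-scan loop that greedily decrements plank counts as it walks the bridge.
import Mathlib
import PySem

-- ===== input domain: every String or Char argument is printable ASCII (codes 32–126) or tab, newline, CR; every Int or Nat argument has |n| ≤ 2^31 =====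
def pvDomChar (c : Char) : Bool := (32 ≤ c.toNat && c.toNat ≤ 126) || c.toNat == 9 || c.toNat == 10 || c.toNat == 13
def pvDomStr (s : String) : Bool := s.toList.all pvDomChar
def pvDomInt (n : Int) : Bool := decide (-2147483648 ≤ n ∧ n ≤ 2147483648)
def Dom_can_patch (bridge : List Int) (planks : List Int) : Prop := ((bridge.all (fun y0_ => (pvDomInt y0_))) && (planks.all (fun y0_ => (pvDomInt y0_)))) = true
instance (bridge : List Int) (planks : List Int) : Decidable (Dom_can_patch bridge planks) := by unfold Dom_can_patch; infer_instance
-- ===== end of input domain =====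

-- B replaces A's greedy run-scan loop by sentinel position differencing plus a per-size
-- demand-vs-supply Counter comparison (an 'alternative' decomposition, same asymptotic cost).

-- ===== PORT A =====
-- A's while loop over bridge, ported as structural recursion with the same state (plank_counts, no_of_holes)
def can_patch_loop : PySem.Dict Int Int → Int → List Int → Bool
  | pc, holes, [] =>
      if holes > 1 then
        if pc.getD holes 0 > 0 then true else false
      else true
  | pc, holes, b :: rest =>
      if b == 0 then can_patch_loop pc (holes + 1) rest
      else
        if holes > 1 then
          if pc.getD holes 0 > 0 then
            can_patch_loop (pc.insert holes (pc.getD holes 0 - 1)) 0 rest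
          else false
        else can_patch_loop pc 0 rest

def can_patch (bridge : List Int) (planks : List Int) : Bool :=
  can_patch_loop (PySem.Dict.counter planks) 0 bridge

-- ===== PORT B =====
def can_patch_alt (bridge : List Int) (planks : List Int) : Bool :=
  -- solid = [-1] + [i for i, x in enumerate(bridge) if x != 0] + [len(bridge)]
  let solid : List Int :=
    [(-1 : Int)] ++ ((PySem.List.enumerate bridge).filter (fun p => p.2 != 0)).map (fun p => p.1)
      ++ [PySem.List.len bridge]
  -- need = Counter(b - a - 1 for a, b in zip(solid, solid[1:]))
  let need := PySem.Dict.counter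
    ((solid.zip (PySem.List.slice solid (some 1) none)).map (fun q => q.2 - q.1 - 1))
  -- have = Counter(planks)
  let haveC := PySem.Dict.counter planks
  -- all(have[g] >= c for g, c in need.items() if g > 1)
  need.items.all (fun gc => if 1 < gc.1 then decide (haveC.getD gc.1 0 ≥ gc.2) else true)

-- ===== PRECONDITION & SPEC =====
def Spec_can_patch (bridge : List Int) (planks : List Int) (out : Bool) : Prop := out = can_patch_alt bridge planks
instance (bridge : List Int) (planks : List Int) (out : Bool) : Decidable (Spec_can_patch bridge planks out) := by unfold Spec_can_patch; infer_instance

-- ===== CLAIM (what is proved, stated in full; the proofs are below) =====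
def Claim_equal_can_patch : Prop := ∀ (bridge : List Int) (planks : List Int), Dom_can_patch bridge planks → Spec_can_patch bridge planks (can_patch bridge planks)

-- ===== LEMMAS AND PROOFS =====

-- proof-side helper: the list of all (possibly empty) zero-run lengths of the bridge,
-- given that `run` zeros immediately precede the current position
def gapsB : Int → List Int → List Int
  | run, [] => [run]
  | run, x :: rest => if x = 0 then gapsB (run + 1) rest else run :: gapsB 0 rest

-- proof-side helper: positions (starting at index i) of the nonzero cells
def posFrom : Int → List Int → List Int
  | _, [] => []
  | i, x :: rest => if x = 0 then posFrom (i + 1) rest else i :: posFrom (i + 1) rest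

theorem enum_filter_eq_posFrom (l : List Int) : ∀ (i : Int),
    ((PySem.List.enumerate l i).filter (fun p => p.2 != 0)).map (fun p => p.1) = posFrom i l := by
  induction l with
  | nil => intro i; simp [PySem.List.enumerate_nil, posFrom]
  | cons x rest ih =>
      intro i
      by_cases hx : x = 0
      · simp [PySem.List.enumerate_cons, posFrom, hx, ih]
      · simp [PySem.List.enumerate_cons, posFrom, hx, ih]

theorem zip_diffs_eq_gapsB (l : List Int) : ∀ (i p : Int),
    (((p :: (posFrom i l ++ [i + (l.length : Int)])).zip (posFrom i l ++ [i + (l.length : Int)])).map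
      (fun q => q.2 - q.1 - 1)) = gapsB (i - p - 1) l := by
  induction l with
  | nil => intro i p; simp [posFrom, gapsB]
  | cons x rest ih =>
      intro i p
      have hlen : i + ((x :: rest).length : Int) = (i + 1) + (rest.length : Int) := by
        simp only [List.length_cons]; push_cast; ring
      by_cases hx : x = 0
      · simp only [posFrom, if_pos hx, hlen]
        rw [ih (i + 1) p]
        have : i - p - 1 + 1 = (i + 1) - p - 1 := by ring
        simp [gapsB, hx, ← this]
      · simp only [posFrom, if_neg hx, hlen, List.cons_append, List.zip_cons_cons, List.map_cons]
        rw [ih (i + 1) i]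
        have h1 : (i + 1) - i - 1 = 0 := by ring
        simp [gapsB, hx]

-- cast-friendly count over a cons
theorem count_cons_int (h g : Int) (l : List Int) :
    (((h :: l).count g : Int)) = (l.count g : Int) + (if h = g then 1 else 0) := by
  simp [List.count_cons]

-- A's loop succeeds iff, for each size g > 1, the number of zero-runs of length g
-- (counting the `holes` zeros already seen as an open run) is covered by the counter
theorem loop_iff (l : List Int) : ∀ (pc : PySem.Dict Int Int) (holes : Int),
    (∀ k, 0 ≤ pc.getD k 0) →
    (can_patch_loop pc holes l = true ↔
      ∀ g, 1 < g → ((gapsB holes l).count g : Int) ≤ pc.getD g 0) := by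
  induction l with
  | nil =>
      intro pc holes hpc
      simp only [can_patch_loop, gapsB]
      by_cases h1 : holes > 1
      · simp only [if_pos h1]
        by_cases hz : pc.getD holes 0 > 0
        · simp only [if_pos hz, true_iff]
          intro g hg
          rw [show (([holes] : List Int)) = holes :: ([] : List Int) from rfl, count_cons_int]
          by_cases hgh : holes = g
          · subst hgh; simp; omega
          · simp [hgh]; simpa using hpc g
        · simp only [if_neg hz, Bool.false_eq_true, false_iff]
          intro h
          have := h holes h1
          rw [show (([holes] : List Int)) = holes :: ([] : List Int) from rfl, count_cons_int] at this
          simp at this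
          omega
      · simp only [if_neg h1, true_iff]
        intro g hg
        rw [show (([holes] : List Int)) = holes :: ([] : List Int) from rfl, count_cons_int]
        have hgh : ¬ (holes = g) := by omega
        simp [hgh]; simpa using hpc g
  | cons x rest ih =>
      intro pc holes hpc
      by_cases hx : x = 0
      · simp only [can_patch_loop, hx, beq_self_eq_true, if_pos, gapsB]
        exact ih pc (holes + 1) hpc
      · have hx' : (x == (0 : Int)) = false := by simp [hx]
        simp only [can_patch_loop, hx', Bool.false_eq_true, if_false, gapsB, if_neg hx]
        by_cases h1 : holes > 1
        · simp only [if_pos h1]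
          by_cases hz : pc.getD holes 0 > 0
          · simp only [if_pos hz]
            rw [ih _ 0 (by
              intro k
              rw [PySem.Dict.getD_insert]
              by_cases hk : k = holes
              · simp [hk]; omega
              · simp [hk]; exact hpc k)]
            constructor
            · intro h g hg
              have hgood := h g hg
              rw [PySem.Dict.getD_insert] at hgood
              rw [count_cons_int]
              by_cases hgh : g = holes
              · subst hgh
                rw [if_pos rfl] at hgood
                rw [if_pos rfl]
                omega
              · rw [if_neg hgh] at hgood
                have hgh' : ¬ (holes = g) := fun e => hgh e.symm
                simp only [if_neg hgh']
                omega
            · intro h g hg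
              have hgood := h g hg
              rw [count_cons_int] at hgood
              rw [PySem.Dict.getD_insert]
              by_cases hgh : g = holes
              · subst hgh
                rw [if_pos rfl] at hgood
                rw [if_pos rfl]
                omega
              · have hgh' : ¬ (holes = g) := fun e => hgh e.symm
                rw [if_neg hgh'] at hgood
                simp only [if_neg hgh]
                omega
          · simp only [if_neg hz, Bool.false_eq_true, false_iff]
            intro h
            have hgood := h holes h1
            rw [count_cons_int] at hgood
            rw [if_pos rfl] at hgood
            have := hpc holes
            omega
        · simp only [if_neg h1]
          rw [ih pc 0 hpc]
          constructor
          · intro h g hg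
            rw [count_cons_int]
            have hgh : ¬ (holes = g) := by omega
            simp only [if_neg hgh, add_zero]
            exact h g hg
          · intro h g hg
            have hgood := h g hg
            rw [count_cons_int] at hgood
            have hgh : ¬ (holes = g) := by omega
            simp only [if_neg hgh, add_zero] at hgood
            exact hgood

-- B's boolean equals the same per-size covering condition
theorem alt_iff (bridge planks : List Int) :
    (can_patch_alt bridge planks = true ↔
      ∀ g, 1 < g → ((gapsB 0 bridge).count g : Int) ≤ (PySem.Dict.counter planks).getD g 0) := by
  unfold can_patch_alt
  simp only [PySem.List.slice_from_one, PySem.List.len_eq, List.singleton_append]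
  rw [enum_filter_eq_posFrom bridge 0]
  have hzip := zip_diffs_eq_gapsB bridge 0 (-1)
  norm_num at hzip
  simp only [List.cons_append, List.tail_cons]
  rw [hzip]
  rw [PySem.Dict.items_counter]
  simp only [List.all_map, List.all_eq_true, Function.comp, PySem.Set.mem_ofList]
  constructor
  · intro h g hg
    by_cases hmem : g ∈ gapsB 0 bridge
    · have := h g hmem
      simp [hg, PySem.Dict.getD_counter] at this
      rw [PySem.Dict.getD_counter]
      exact_mod_cast this
    · have hc : (gapsB 0 bridge).count g = 0 := List.count_eq_zero.mpr hmem
      rw [hc]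
      rw [PySem.Dict.getD_counter]
      positivity
  · intro h k hk
    by_cases h1 : 1 < k
    · simp only [if_pos h1, decide_eq_true_eq, ge_iff_le]
      exact h k h1
    · simp [h1]

-- ===== VERDICT (by name: the statement is the Claim_ definition above) =====
theorem can_patch_spec : Claim_equal_can_patch := by
  intro bridge planks _
  unfold Spec_can_patch
  have hA := loop_iff bridge (PySem.Dict.counter planks) 0 (by
    intro k; rw [PySem.Dict.getD_counter]; positivity)
  have hB := alt_iff bridge planks
  rw [Bool.eq_iff_iff]
  unfold can_patch
  rw [hA, hB]
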